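-- pv_equiv track=rewrite | github.com/renovate-bot/khulnasoft-lab-_-ai-assist | ai_gateway/code_suggestions/processing/ops.py | find_non_whitespace_point
-- ===== SOURCE A (Python) =====
-- def find_non_whitespace_point(value: str, start_index: int = 0) -> tuple[int, int]:
--     row = 0
--     col = 0
--
--     found_row = -1
--     found_col = -1
--
--     for idx, c in enumerate(value):
--         if c == "\n":
--             # increase the row counter and reset the column one
--             row += 1
--             col = 0
--             continue
--
--         if idx >= start_index and not c.isspace():
--             found_row = row
--             found_col = col
--             break
--
--         col += 1
--
--     return found_row, found_col
-- ===== SOURCE B (Python) =====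
-- def find_non_whitespace_point(value: str, start_index: int = 0) -> tuple[int, int]:
--     for idx in range(max(0, start_index), len(value)):
--         if not value[idx].isspace():
--             before = value[:idx]
--             return before.count("\n"), idx - (before.rfind("\n") + 1)
--     return -1, -1
-- ===== Notes on version B (the rewrite author's own statement) =====
-- stated objective: simpler
-- what changed: Instead of a single stateful pass tracking row/col counters with a mid-loop break, B first finds the index of the first non-whitespace character at or after max(0, start_index), then derives the row by counting newlines in the prefix and the column from the last newline position (rfind) in that prefix.
import Mathlib
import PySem

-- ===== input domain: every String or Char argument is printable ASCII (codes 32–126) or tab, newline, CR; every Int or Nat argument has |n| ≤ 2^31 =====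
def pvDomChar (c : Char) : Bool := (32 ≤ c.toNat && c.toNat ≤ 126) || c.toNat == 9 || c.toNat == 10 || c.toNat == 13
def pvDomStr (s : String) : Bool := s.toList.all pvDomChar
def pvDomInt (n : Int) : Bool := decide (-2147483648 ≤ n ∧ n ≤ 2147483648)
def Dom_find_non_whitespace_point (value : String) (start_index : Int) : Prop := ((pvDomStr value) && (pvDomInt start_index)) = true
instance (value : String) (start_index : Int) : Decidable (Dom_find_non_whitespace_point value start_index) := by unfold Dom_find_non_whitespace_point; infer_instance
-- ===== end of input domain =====

-- B replaces A's single stateful row/col-tracking pass by: find the first non-whitespace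
-- index at or after max(0, start_index), then derive row/col from the prefix with
-- count('\n') and rfind('\n') (objective: simpler).

-- ===== PORT A =====
-- the enumerate loop of A: state (idx, row, col), early break returns (row, col)
def pvGoA : List Char → Nat → Int → Int → Int → Int × Int
  | [], _, _, _, _ => (-1, -1)
  | c :: rest, idx, start, row, col =>
    if c = '\n' then pvGoA rest (idx + 1) start (row + 1) 0
    else if start ≤ (idx : Int) ∧ PySem.Chars.isspace c = false then (row, col)
    else pvGoA rest (idx + 1) start row (col + 1)

def find_non_whitespace_point (value : String) (start_index : Int) : Int × Int :=
  pvGoA value.toList 0 start_index 0 0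

-- ===== PORT B =====
-- the 'for idx in range(max(0,start_index), len(value))' search of Source B
def pvGoB : List Char → Nat → Option Nat
  | [], _ => none
  | c :: rest, j => if PySem.Chars.isspace c = false then some j else pvGoB rest (j + 1)

def find_non_whitespace_point_alt (value : String) (start_index : Int) : Int × Int :=
  let s := value.toList
  let k := (max 0 start_index).toNat
  match pvGoB (s.drop k) k with
  | none => (-1, -1)
  | some j =>
      let before := s.take j
      ((PySem.Chars.count before ['\n'] : Int),
       (j : Int) - (PySem.Chars.rfind before ['\n'] + 1))

-- ===== PRECONDITION & SPEC =====
def Spec_find_non_whitespace_point (value : String) (start_index : Int) (out : Int × Int) : Prop := out = find_non_whitespace_point_alt value start_index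
instance (value : String) (start_index : Int) (out : Int × Int) : Decidable (Spec_find_non_whitespace_point value start_index out) := by unfold Spec_find_non_whitespace_point; infer_instance

-- ===== CLAIM (what is proved, stated in full; the proofs are below) =====
def Claim_equal_find_non_whitespace_point : Prop := ∀ (value : String) (start_index : Int), Dom_find_non_whitespace_point value start_index → Spec_find_non_whitespace_point value start_index (find_non_whitespace_point value start_index)

-- ===== LEMMAS AND PROOFS =====

-- Chars.count with the single-character needle '\n' is List.count
lemma pvCountNL_go (l : List Char) : ∀ (fuel acc : Nat), l.length ≤ fuel →
    PySem.Chars.count.go ['\n'] fuel l acc = acc + l.count '\n' := by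
  induction l with
  | nil => intro fuel acc _; cases fuel <;> simp [PySem.Chars.count.go]
  | cons c t ih =>
    intro fuel acc h
    cases fuel with
    | zero => simp at h
    | succ f =>
      have ht : t.length ≤ f := by simpa using h
      by_cases hc : '\n' = c
      · simp [PySem.Chars.count.go, List.isPrefixOf, ih f (acc + 1) ht, ← hc]
        ring
      · simp [PySem.Chars.count.go, List.isPrefixOf, hc, ih f acc ht]
        simp [Ne.symm hc]

lemma pvCountNL (p : List Char) : PySem.Chars.count p ['\n'] = p.count '\n' := by
  simp [PySem.Chars.count, pvCountNL_go p p.length 0 le_rfl]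

lemma pvPref (xs : List Char) : (List.isPrefixOf ['\n'] xs) = (xs.head? == some '\n') := by
  cases xs <;> simp [List.isPrefixOf, eq_comm]

lemma pvRfind_go_snoc : ∀ (m : Nat) (p : List Char) (c : Char), m < p.length →
    PySem.Chars.rfind.go (p ++ [c]) ['\n'] m = PySem.Chars.rfind.go p ['\n'] m := by
  intro m
  induction m with
  | zero =>
    intro p c h
    rw [PySem.Chars.rfind.go, PySem.Chars.rfind.go]
    cases p with
    | nil => simp at h
    | cons d p' => simp [pvPref]
  | succ m ih =>
    intro p c h
    rw [PySem.Chars.rfind.go, PySem.Chars.rfind.go]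
    have hd : (p ++ [c]).drop (m+1) = p.drop (m+1) ++ [c] :=
      List.drop_append_of_le_length (by omega)
    have hne : p.drop (m+1) ≠ [] := by
      intro hh; have := List.drop_eq_nil_iff.mp hh; omega
    rw [hd]
    rw [pvPref, pvPref, List.head?_append]
    cases hh : (p.drop (m+1)).head? with
    | none => exact absurd (List.head?_eq_none_iff.mp hh) hne
    | some d => simp [ih p c (by omega)]

lemma pvRfind_snoc (p : List Char) (c : Char) :
    PySem.Chars.rfind (p ++ [c]) ['\n'] =
      if c = '\n' then (p.length : Int) else PySem.Chars.rfind p ['\n'] := by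
  cases p with
  | nil =>
    have e1 : PySem.Chars.rfind ([] ++ [c]) ['\n'] = PySem.Chars.rfind.go [c] ['\n'] 1 := rfl
    rw [e1, PySem.Chars.rfind.go]
    have h1 : ([c] : List Char).drop 1 = [] := rfl
    rw [h1, pvPref]
    simp only [List.head?_nil, show ((none : Option Char) == some '\n') = false from rfl,
      Bool.false_eq_true, if_false]
    rw [PySem.Chars.rfind.go]
    by_cases hc : c = '\n'
    · simp [pvPref, hc]
    · simp [pvPref, hc, PySem.Chars.rfind]
      rw [PySem.Chars.rfind.go]
      simp [pvPref]
  | cons d p' =>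
    show PySem.Chars.rfind ((d :: p') ++ [c]) ['\n'] = _
    rw [PySem.Chars.rfind]
    have hlen : ((d :: p') ++ [c]).length = p'.length + 2 := by simp
    rw [hlen]
    rw [PySem.Chars.rfind.go]
    have h1 : ((d :: p') ++ [c]).drop (p'.length + 2) = [] := by
      apply List.drop_eq_nil_of_le; simp
    rw [h1]
    simp only [pvPref, List.head?_nil]
    simp only [show ((none : Option Char) == some '\n') = false from rfl]
    rw [PySem.Chars.rfind.go]
    have h2 : ((d :: p') ++ [c]).drop (p'.length + 1) = [c] := by
      have : ((d :: p') ++ [c]).drop (p'.length + 1) = (d :: p').drop (p'.length + 1) ++ [c] :=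
        List.drop_append_of_le_length (by simp)
      simpa using this
    rw [h2, pvPref]
    by_cases hc : c = '\n'
    · simp [hc]
    · have : (([c].head?) == some '\n') = false := by simp [hc]
      rw [this]
      simp only [if_false, Bool.false_eq_true]
      rw [pvRfind_go_snoc p'.length (d :: p') c (by simp)]
      rw [PySem.Chars.rfind]
      conv_rhs => rw [show (d :: p').length = p'.length + 1 from by simp, PySem.Chars.rfind.go]
      have h3 : (d :: p').drop (p'.length + 1) = [] := by apply List.drop_eq_nil_of_le; simp
      rw [h3, pvPref]
      simp [hc]

lemma pvRfind_nil : PySem.Chars.rfind [] ['\n'] = -1 := by decide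

-- B's result computed from search position m of the full character list X
def pvRes (X : List Char) (m : Nat) : Int × Int :=
  match pvGoB (X.drop m) m with
  | none => (-1, -1)
  | some j => (((X.take j).count '\n' : Int),
               (j : Int) - (PySem.Chars.rfind (X.take j) ['\n'] + 1))

lemma pvRes_succ (X : List Char) (i : Nat) (c : Char) (rest : List Char)
    (hX : X.drop i = c :: rest) (hsp : PySem.Chars.isspace c = true) :
    pvRes X i = pvRes X (i + 1) := by
  have h1 : X.drop (i + 1) = rest := by
    rw [← List.drop_drop, hX]; rfl
  unfold pvRes
  rw [hX, h1]
  simp [pvGoB, hsp]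

lemma pvRes_step (X : List Char) (i k : Nat) (c : Char) (rest : List Char)
    (hX : X.drop i = c :: rest) (hsp : PySem.Chars.isspace c = true) :
    pvRes X (max i k) = pvRes X (max (i + 1) k) := by
  rcases le_or_gt k i with h | h
  · rw [max_eq_left h, max_eq_left (by omega), pvRes_succ X i c rest hX hsp]
  · rw [max_eq_right (le_of_lt h), max_eq_right (by omega)]

lemma pvMain : ∀ (t p : List Char) (start : Int),
    pvGoA t p.length start ((p.count '\n' : Int))
      ((p.length : Int) - (PySem.Chars.rfind p ['\n'] + 1)) =
    pvRes (p ++ t) (max p.length (max 0 start).toNat) := by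
  intro t
  induction t with
  | nil =>
    intro p start
    have hd : p.drop (max p.length (max 0 start).toNat) = [] := by
      apply List.drop_eq_nil_of_le; exact le_max_left _ _
    simp [pvGoA, pvRes, hd, pvGoB]
  | cons c rest ih =>
    intro p start
    have hXd : (p ++ c :: rest).drop p.length = c :: rest := by simp
    have hlen : (p ++ [c]).length = p.length + 1 := by simp
    have happ : (p ++ [c]) ++ rest = p ++ c :: rest := by simp
    by_cases hnl : c = '\n'
    · -- newline branch
      have hsp : PySem.Chars.isspace c = true := by subst hnl; decide
      have hcnt : (((p ++ [c]).count '\n' : Nat) : Int) = (p.count '\n' : Int) + 1 := by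
        subst hnl; simp [List.count_append]
      have hcol : ((p ++ [c]).length : Int) - (PySem.Chars.rfind (p ++ [c]) ['\n'] + 1) = 0 := by
        rw [pvRfind_snoc, if_pos hnl]; simp
      have := ih (p ++ [c]) start
      rw [hcnt, hcol, hlen, happ] at this
      rw [pvGoA, if_pos hnl, this, ← pvRes_step _ _ _ c rest hXd hsp]
    · by_cases hsp : PySem.Chars.isspace c = true
      · -- non-newline whitespace: no break, col += 1
        have hcnt : (((p ++ [c]).count '\n' : Nat) : Int) = (p.count '\n' : Int) := by
          simp [List.count_append, hnl]
        have hcol : ((p ++ [c]).length : Int) - (PySem.Chars.rfind (p ++ [c]) ['\n'] + 1)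
            = ((p.length : Int) - (PySem.Chars.rfind p ['\n'] + 1)) + 1 := by
          rw [pvRfind_snoc, if_neg hnl]; push_cast [hlen]; ring
        have := ih (p ++ [c]) start
        rw [hcnt, hcol, hlen, happ] at this
        rw [pvGoA, if_neg hnl, if_neg (by simp [hsp]), this,
          ← pvRes_step _ _ _ c rest hXd hsp]
      · -- non-whitespace
        have hspf : PySem.Chars.isspace c = false := by simpa using hsp
        by_cases hst : start ≤ (p.length : Int)
        · have hk : (max 0 start).toNat ≤ p.length := by omega
          rw [pvGoA, if_neg hnl, if_pos ⟨hst, hspf⟩]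
          unfold pvRes
          rw [max_eq_left hk, hXd]
          rw [show pvGoB (c :: rest) p.length = some p.length from by simp [pvGoB, hspf]]
          simp
        · have hk : p.length + 1 ≤ (max 0 start).toNat := by omega
          have hcnt : (((p ++ [c]).count '\n' : Nat) : Int) = (p.count '\n' : Int) := by
            simp [List.count_append, hnl]
          have hcol : ((p ++ [c]).length : Int) - (PySem.Chars.rfind (p ++ [c]) ['\n'] + 1)
              = ((p.length : Int) - (PySem.Chars.rfind p ['\n'] + 1)) + 1 := by
            rw [pvRfind_snoc, if_neg hnl]; push_cast [hlen]; ring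
          have := ih (p ++ [c]) start
          rw [hcnt, hcol, hlen, happ] at this
          rw [show max (p.length + 1) (max 0 start).toNat
                = max p.length (max 0 start).toNat from by omega] at this
          rw [pvGoA, if_neg hnl, if_neg (by intro h; exact hst h.1), this]

-- ===== VERDICT (by name: the statement is the Claim_ definition above) =====
theorem find_non_whitespace_point_spec : Claim_equal_find_non_whitespace_point := by
  intro value start _
  unfold Spec_find_non_whitespace_point find_non_whitespace_point find_non_whitespace_point_alt
  have h := pvMain value.toList [] start
  simp [pvRfind_nil] at h
  rw [h]
  simp [pvRes, pvCountNL]
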